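-- pv_equiv track=rewrite | github.com/jiwoos00/algorithm | programmers/PCCP1#1.py | solution
-- ===== SOURCE A (Python) =====
-- def solution(input_string):
--
--     cnt = dict()
--
--     for idx, s in enumerate(input_string):
--         if s in cnt:
--             cnt[s].append(idx)
--         else:
--             cnt[s] = [idx]
--
--     ans = []
--     for s, num in cnt.items():
--         for i in range(1, len(num)):
--             if cnt[s][i] - cnt[s][i - 1] > 1:
--                 ans.append(s)
--                 break
--     ans.sort()
--
--     if ans:
--         return (''.join(ans))
--     else:
--         return ("N")
-- ===== SOURCE B (Python) =====
-- def solution(input_string):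
--     last = {}
--     qual = set()
--     for idx, c in enumerate(input_string):
--         if c in last and idx - last[c] > 1:
--             qual.add(c)
--         last[c] = idx
--     ans = sorted(qual)
--     return ''.join(ans) if ans else 'N'
-- ===== Notes on version B (the rewrite author's own statement) =====
-- stated objective: simpler
-- what changed: Replaces A's per-char index lists plus an inner gap-scanning loop over each list with a single pass that keeps only each char's last index in a dict and collects qualifying chars in a set; the inner loop and the per-char lists disappear.
import Mathlib
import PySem

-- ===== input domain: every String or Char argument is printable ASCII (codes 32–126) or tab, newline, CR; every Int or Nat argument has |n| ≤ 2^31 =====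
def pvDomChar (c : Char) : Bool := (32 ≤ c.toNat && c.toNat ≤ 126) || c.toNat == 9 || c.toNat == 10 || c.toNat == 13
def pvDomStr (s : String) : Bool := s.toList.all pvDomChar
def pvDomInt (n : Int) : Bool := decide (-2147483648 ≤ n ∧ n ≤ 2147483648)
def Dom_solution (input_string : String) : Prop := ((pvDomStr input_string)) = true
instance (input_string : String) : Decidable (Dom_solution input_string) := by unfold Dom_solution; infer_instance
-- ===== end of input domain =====

-- B replaces A's per-char index lists and inner gap-scan loop with a one-pass
-- last-index dict plus a set of qualifying chars (objective: simpler).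

-- ===== PORT A =====
-- the dict-building loop body: if s in cnt: cnt[s].append(idx) else cnt[s] = [idx]
def cntStep (d : PySem.Dict Char (List Int)) (p : Int × Char) : PySem.Dict Char (List Int) :=
  if d.contains p.2 then d.insert p.2 (d.getD p.2 [] ++ [p.1]) else d.insert p.2 [p.1]

-- inner loop 'for i in range(1, len(num)): if num[i] - num[i-1] > 1: ans.append(s); break'
def solGapLoop (s : Char) (num : List Int) (ans : List Char) (i : Nat) : List Char :=
  if i < num.length then
    if PySem.List.pyGetD num (i : Int) 0 - PySem.List.pyGetD num ((i : Int) - 1) 0 > 1 then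
      ans ++ [s]
    else solGapLoop s num ans (i + 1)
  else ans
termination_by num.length - i

def solution (input_string : String) : String :=
  let cnt := (PySem.List.enumerate input_string.toList 0).foldl cntStep PySem.Dict.empty
  let ans := cnt.items.foldl (fun acc q => solGapLoop q.1 q.2 acc 1) []
  let ans := PySem.List.sorted ans (fun x => x) false
  if ans ≠ [] then String.ofList ans else "N"

-- ===== PORT B =====
-- loop body: if c in last and idx - last[c] > 1: qual.add(c); last[c] = idx
def lastStep (st : PySem.Dict Char Int × PySem.Set Char) (p : Int × Char) :
    PySem.Dict Char Int × PySem.Set Char :=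
  (st.1.insert p.2 p.1,
   if st.1.contains p.2 && decide (p.1 - st.1.getD p.2 0 > 1) then PySem.Set.add st.2 p.2 else st.2)

def solution_alt (input_string : String) : String :=
  let st := (PySem.List.enumerate input_string.toList 0).foldl lastStep
    (PySem.Dict.empty, PySem.Set.empty)
  let ans := PySem.List.sorted st.2 (fun x => x) false
  if ans ≠ [] then String.ofList ans else "N"

-- ===== PRECONDITION & SPEC =====
def Spec_solution (input_string : String) (out : String) : Prop := out = solution_alt input_string
instance (input_string : String) (out : String) : Decidable (Spec_solution input_string out) := by unfold Spec_solution; infer_instance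

-- ===== CLAIM (what is proved, stated in full; the proofs are below) =====
def Claim_equal_solution : Prop := ∀ (input_string : String), Dom_solution input_string → Spec_solution input_string (solution input_string)

-- ===== LEMMAS AND PROOFS =====

-- occurrence indices of c in a list of (index, char) pairs
def occList (l : List (Int × Char)) (c : Char) : List Int :=
  (l.filter (fun p => p.2 == c)).map (·.1)

-- does the list, chained after an optional previous value, contain an adjacent gap > 1?
def chainGap : Option Int → List Int → Bool
  | _, [] => false
  | none, i :: t => chainGap (some i) t
  | some p, i :: t => decide (i - p > 1) || chainGap (some i) t

-- Bool shape of A's inner loop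
def gapAux (num : List Int) (i : Nat) : Bool :=
  if i < num.length then decide (num.getD i 0 - num.getD (i - 1) 0 > 1) || gapAux num (i + 1)
  else false
termination_by num.length - i

lemma occList_cons (p : Int × Char) (l : List (Int × Char)) (c : Char) :
    occList (p :: l) c = if p.2 = c then p.1 :: occList l c else occList l c := by
  simp only [occList, List.filter_cons]
  split_ifs with h <;> simp_all

lemma chainGap_nil (o : Option Int) : chainGap o [] = false := by cases o <;> rfl

lemma chainGap_some_cons (p a : Int) (t : List Int) :
    chainGap (some p) (a :: t) = (decide (a - p > 1) || chainGap (some a) t) := rfl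

lemma solGapLoop_eq (s : Char) (num : List Int) :
    ∀ n i, 1 ≤ i → num.length - i ≤ n → ∀ ans,
      solGapLoop s num ans i = if gapAux num i then ans ++ [s] else ans := by
  intro n
  induction n with
  | zero =>
    intro i hi hn ans
    have hge : num.length ≤ i := by omega
    rw [solGapLoop, gapAux]
    simp [Nat.not_lt.mpr hge]
  | succ m ih =>
    intro i hi hn ans
    by_cases hlt : i < num.length
    · rw [solGapLoop, gapAux]
      have hcast : ((i : Int) - 1) = ((i - 1 : Nat) : Int) := by omega
      rw [hcast, PySem.List.pyGetD_natCast, PySem.List.pyGetD_natCast]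
      simp only [if_pos hlt, List.getD_eq_getElem?_getD]
      by_cases hg : (1 : Int) < num[i]?.getD 0 - num[i - 1]?.getD 0
      · simp [hg]
      · have hd : decide ((1 : Int) < num[i]?.getD 0 - num[i - 1]?.getD 0) = false :=
          decide_eq_false hg
        rw [if_neg hg]
        simp only [gt_iff_lt, hd, Bool.false_or]
        exact ih (i + 1) (by omega) (by omega) ans
    · rw [solGapLoop, gapAux]
      simp [hlt]

lemma gapAux_eq_chainGap (num : List Int) :
    ∀ n i, 1 ≤ i → num.length - i ≤ n →
      gapAux num i = chainGap (some (num.getD (i - 1) 0)) (num.drop i) := by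
  intro n
  induction n with
  | zero =>
    intro i hi hn
    have hge : num.length ≤ i := by omega
    rw [gapAux]
    simp [Nat.not_lt.mpr hge, List.drop_eq_nil_of_le hge, chainGap]
  | succ m ih =>
    intro i hi hn
    by_cases hlt : i < num.length
    · have hdrop : num.drop i = num[i] :: num.drop (i + 1) :=
        (List.getElem_cons_drop hlt).symm
      have h1 : num.getD i 0 = num[i] := List.getD_eq_getElem num 0 hlt
      rw [gapAux]
      simp only [if_pos hlt]
      rw [hdrop, chainGap_some_cons, h1]
      have ih' := ih (i + 1) (by omega) (by omega)
      rw [Nat.add_sub_cancel, h1] at ih'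
      rw [ih']
    · rw [gapAux]
      simp [hlt, List.drop_eq_nil_of_le (Nat.le_of_not_lt hlt), chainGap]

lemma gapAux_one_eq (num : List Int) : gapAux num 1 = chainGap none num := by
  cases num with
  | nil => rw [gapAux]; simp [chainGap]
  | cons a t =>
    have := gapAux_eq_chainGap (a :: t) t.length 1 (by omega) (by simp)
    simpa [chainGap] using this

lemma cntStep_eq_modify (d : PySem.Dict Char (List Int)) (p : Int × Char) :
    cntStep d p = d.modify p.2 [] (· ++ [p.1]) := by
  unfold cntStep
  by_cases h : d.contains p.2 = true
  · simp [h, PySem.Dict.modify]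
  · have hg : d.getD p.2 [] = [] :=
      PySem.Dict.getD_of_not_contains d [] (by simpa using h)
    simp [h, PySem.Dict.modify, hg]

lemma getD_foldA (l : List (Int × Char)) :
    ∀ (d : PySem.Dict Char (List Int)) (c : Char),
      (l.foldl cntStep d).getD c [] = d.getD c [] ++ occList l c := by
  induction l with
  | nil => intro d c; simp [occList]
  | cons p l ih =>
    intro d c
    rw [List.foldl_cons, ih, cntStep_eq_modify, PySem.Dict.getD_modify, occList_cons]
    by_cases h : c = p.2
    · simp [h]
    · simp [h, Ne.symm h]

lemma keys_foldA (l : List (Int × Char)) (d : PySem.Dict Char (List Int)) :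
    (l.foldl cntStep d).keys = PySem.Set.update d.keys (l.map (·.2)) := by
  have hfun : cntStep = fun d (p : Int × Char) => d.modify p.2 [] (· ++ [p.1]) := by
    funext d p; exact cntStep_eq_modify d p
  rw [hfun]
  exact PySem.Dict.keys_foldl_modify_key l (·.2) [] (fun _ p => (· ++ [p.1])) d

lemma B_mem (l : List (Int × Char)) :
    ∀ (last : PySem.Dict Char Int) (qual : PySem.Set Char) (c : Char),
      (c ∈ (l.foldl lastStep (last, qual)).2) ↔
        (c ∈ qual ∨ chainGap (last.get? c) (occList l c) = true) := by
  induction l with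
  | nil => intro last qual c; simp [occList, chainGap_nil]
  | cons p l ih =>
    intro last qual c
    rw [List.foldl_cons]
    have step : lastStep (last, qual) p =
        (last.insert p.2 p.1,
         if last.contains p.2 && decide (p.1 - last.getD p.2 0 > 1)
         then PySem.Set.add qual p.2 else qual) := rfl
    rw [step, ih, occList_cons]
    by_cases hc : c = p.2
    · subst hc
      rw [PySem.Dict.get?_insert_self]
      simp only [if_pos rfl]
      cases hval : last.get? p.2 with
      | none =>
        have hcont : last.contains p.2 = false := by
          rw [PySem.Dict.contains_eq_isSome_get?, hval]; rfl
        simp [hcont, chainGap, hval]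
      | some v =>
        have hcont : last.contains p.2 = true := by
          rw [PySem.Dict.contains_eq_isSome_get?, hval]; rfl
        have hgetD : last.getD p.2 0 = v := PySem.Dict.getD_of_get?_eq_some last 0 hval
        by_cases hg : p.1 - v > 1
        · simp [hcont, hgetD, hg, chainGap, hval, PySem.Set.mem_add]
        · simp [hcont, hgetD, hg, chainGap, hval]
    · rw [PySem.Dict.get?_insert_of_ne last p.1 hc,
        if_neg (show ¬ (p.2 = c) from fun h => hc h.symm)]
      split_ifs with h
      · simp [PySem.Set.mem_add, hc]
      · exact Iff.rfl

lemma B_nodup (l : List (Int × Char)) :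
    ∀ (last : PySem.Dict Char Int) (qual : PySem.Set Char), qual.Nodup →
      ((l.foldl lastStep (last, qual)).2).Nodup := by
  induction l with
  | nil => intro last qual h; exact h
  | cons p l ih =>
    intro last qual h
    rw [List.foldl_cons]
    have step : lastStep (last, qual) p =
        (last.insert p.2 p.1,
         if last.contains p.2 && decide (p.1 - last.getD p.2 0 > 1)
         then PySem.Set.add qual p.2 else qual) := rfl
    rw [step]
    apply ih
    split_ifs with hcond
    · exact PySem.Set.nodup_add qual p.2 h
    · exact h

lemma chainGap_ne_nil {num : List Int} (h : chainGap none num = true) : num ≠ [] := by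
  intro he; rw [he, chainGap_nil] at h; exact absurd h (by simp)

lemma occList_ne_nil_iff (cs : List Char) (c : Char) :
    occList (PySem.List.enumerate cs 0) c ≠ [] ↔ c ∈ cs := by
  constructor
  · intro h
    rcases List.exists_mem_of_ne_nil _ h with ⟨i, hi⟩
    simp only [occList, List.mem_map] at hi
    rcases hi with ⟨p, hp, _⟩
    have hpmem := List.mem_of_mem_filter hp
    have hpc : p.2 = c := by
      have := List.of_mem_filter hp
      simpa using this
    rw [PySem.List.mem_enumerate_iff] at hpmem
    rcases hpmem with ⟨k, hk, hpk⟩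
    rw [hpk] at hpc
    simp only at hpc
    exact hpc ▸ List.getElem_mem hk
  · intro h
    rcases List.mem_iff_getElem.mp h with ⟨k, hk, hck⟩
    intro hnil
    have hmem : ((0 : Int) + k, cs[k]) ∈ PySem.List.enumerate cs 0 := by
      rw [PySem.List.mem_enumerate_iff]; exact ⟨k, hk, rfl⟩
    have : (((0 : Int) + k, cs[k]) : Int × Char) ∈
        (PySem.List.enumerate cs 0).filter (fun p => p.2 == c) := by
      apply List.mem_filter.mpr
      exact ⟨hmem, by simp [hck]⟩
    have : ((0 : Int) + k) ∈ occList (PySem.List.enumerate cs 0) c :=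
      List.mem_map.mpr ⟨_, this, rfl⟩
    rw [hnil] at this
    exact absurd this (by simp)

lemma main_eq (cs : List Char) :
    PySem.List.sorted
      (((PySem.List.enumerate cs 0).foldl cntStep PySem.Dict.empty).items.foldl
        (fun acc q => solGapLoop q.1 q.2 acc 1) []) (fun x => x) false =
    PySem.List.sorted
      (((PySem.List.enumerate cs 0).foldl lastStep (PySem.Dict.empty, PySem.Set.empty)).2)
      (fun x => x) false := by
  have hkeys : ((PySem.List.enumerate cs 0).foldl cntStep PySem.Dict.empty).keys =
      PySem.Set.ofList cs := by
    rw [keys_foldA, PySem.Dict.keys_empty, PySem.List.map_snd_enumerate]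
    rfl
  have hnodup : ((PySem.List.enumerate cs 0).foldl cntStep PySem.Dict.empty).keys.Nodup := by
    rw [hkeys]; exact PySem.Set.nodup_ofList cs
  have hgetD : ∀ c, ((PySem.List.enumerate cs 0).foldl cntStep PySem.Dict.empty).getD c [] =
      occList (PySem.List.enumerate cs 0) c := by
    intro c; rw [getD_foldA]; simp [PySem.Dict.getD_empty]
  have hansA : ((PySem.List.enumerate cs 0).foldl cntStep PySem.Dict.empty).items.foldl
        (fun acc q => solGapLoop q.1 q.2 acc 1) [] =
      (PySem.Set.ofList cs).filter
        (fun c => chainGap none (occList (PySem.List.enumerate cs 0) c)) := by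
    rw [PySem.List.foldl_congr_mem _ _
        (fun acc (q : Char × List Int) => if chainGap none q.2 then acc ++ [q.1] else acc) []
        (by
          intro acc q _
          rw [solGapLoop_eq q.1 q.2 q.2.length 1 (by omega) (by omega) acc, gapAux_one_eq])]
    rw [PySem.List.foldl_append_if (fun (q : Char × List Int) => chainGap none q.2)
        (fun q => q.1)]
    rw [PySem.Dict.items_eq_map_keys _ hnodup [], hkeys, List.filter_map, List.map_map]
    simp only [List.nil_append, Function.comp_def]
    rw [List.filter_congr (fun c _ => by rw [hgetD c])]
    exact List.map_id _
  rw [hansA]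
  have hmemB : ∀ c, (c ∈ ((PySem.List.enumerate cs 0).foldl lastStep
      (PySem.Dict.empty, PySem.Set.empty)).2) ↔
      chainGap none (occList (PySem.List.enumerate cs 0) c) = true := by
    intro c
    rw [B_mem]
    simp [PySem.Set.empty, PySem.Dict.get?_empty]
  have hnodB : (((PySem.List.enumerate cs 0).foldl lastStep
      (PySem.Dict.empty, PySem.Set.empty)).2).Nodup :=
    B_nodup _ PySem.Dict.empty PySem.Set.empty (by simp [PySem.Set.empty])
  have hnodA : ((PySem.Set.ofList cs).filter
      (fun c => chainGap none (occList (PySem.List.enumerate cs 0) c))).Nodup :=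
    (PySem.Set.nodup_ofList cs).filter _
  have hperm : ((PySem.Set.ofList cs).filter
      (fun c => chainGap none (occList (PySem.List.enumerate cs 0) c))).Perm
      (((PySem.List.enumerate cs 0).foldl lastStep (PySem.Dict.empty, PySem.Set.empty)).2) := by
    rw [List.perm_ext_iff_of_nodup hnodA hnodB]
    intro c
    rw [hmemB, List.mem_filter]
    constructor
    · rintro ⟨_, h⟩; simpa using h
    · intro h
      refine ⟨?_, by simpa using h⟩
      rw [PySem.Set.mem_ofList]
      exact (occList_ne_nil_iff cs c).mp (chainGap_ne_nil h)
  exact PySem.List.sorted_eq_sorted_of_perm _ _ _ (fun _ _ h => h) hperm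

-- ===== VERDICT (by name: the statement is the Claim_ definition above) =====
theorem solution_spec : Claim_equal_solution := by
  intro input_string _
  unfold Spec_solution
  simp only [solution, solution_alt]
  rw [main_eq input_string.toList]
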